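-- pv_equiv track=rewrite | github.com/zatosource/zato | code/zato-server/src/zato/server/service/internal/generic/connection.py | _filter_items_by_query
-- ===== SOURCE A (Python) =====
-- def _filter_items_by_query(items:'anylist', query_tokens:'anylist') -> 'anylist':
--     if not query_tokens:
--         return items
--     out = []
--     for item in items:
--         name = (item.get('name') or '')
--         ok = True
--         for criterion in query_tokens:
--             neg = criterion.startswith('-')
--             crit = criterion[1:] if neg else criterion
--             contained = crit in name
--             if neg and contained:
--                 ok = False
--                 break
--             if not neg and not contained:
--                 ok = False
--                 break
--         if ok:
--             out.append(item)
--     return out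
-- ===== SOURCE B (Python) =====
-- def _filter_items_by_query(items, query_tokens):
--     if not query_tokens:
--         return items
--     survivors = [((item.get('name') or ''), item) for item in items]
--     for token in query_tokens:
--         if token.startswith('-'):
--             crit = token[1:]
--             survivors = [(name, item) for (name, item) in survivors if crit not in name]
--         else:
--             survivors = [(name, item) for (name, item) in survivors if token in name]
--     return [item for (_, item) in survivors]
-- ===== Notes on version B (the rewrite author's own statement) =====
-- stated objective: alternative
-- what changed: Inverts the loop nesting: instead of A's per-item inner loop over all tokens with an ok flag and break, B computes each item's name once, then iterates over the tokens in the outer loop, narrowing a survivor list of (name, item) pairs by one filtering pass per token, and finally projects the surviving items.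
import Mathlib
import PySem

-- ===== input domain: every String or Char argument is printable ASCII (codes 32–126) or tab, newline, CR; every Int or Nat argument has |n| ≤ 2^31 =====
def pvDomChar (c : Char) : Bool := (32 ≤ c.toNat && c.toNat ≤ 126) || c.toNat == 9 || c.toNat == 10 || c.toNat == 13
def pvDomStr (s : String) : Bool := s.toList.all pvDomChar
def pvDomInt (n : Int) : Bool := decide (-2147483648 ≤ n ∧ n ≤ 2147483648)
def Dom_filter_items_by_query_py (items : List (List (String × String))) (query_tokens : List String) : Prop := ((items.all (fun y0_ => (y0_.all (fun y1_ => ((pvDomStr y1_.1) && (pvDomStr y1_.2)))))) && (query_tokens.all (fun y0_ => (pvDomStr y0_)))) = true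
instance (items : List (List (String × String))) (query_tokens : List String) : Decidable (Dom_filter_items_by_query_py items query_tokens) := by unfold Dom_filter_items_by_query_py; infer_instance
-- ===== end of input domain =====

-- B inverts the loop nesting: names are computed once, then each token makes one filtering
-- pass over a survivor list of (name, item) pairs, instead of A's per-item inner token loop
-- with an ok flag and break; same return value, no speed claim.

-- ===== PORT A =====
-- inner token loop of A with its break (ok flag): returns false as soon as a criterion fails
def pvOkA (name : String) : List String → Bool
  | [] => true
  | criterion :: rest =>
    let neg := PySem.Str.startswith criterion "-"
    let crit := if neg then PySem.Str.slice criterion (some 1) none else criterion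
    let contained := PySem.Str.isIn crit name
    if neg && contained then false
    else if !neg && !contained then false
    else pvOkA name rest

def filter_items_by_query_py (items : List (List (String × String))) (query_tokens : List String) : List (List (String × String)) :=
  if query_tokens = [] then items
  else
    items.foldl (fun out item =>
      let name := ((PySem.Dict.mk item).get? "name").getD ""
      if pvOkA name query_tokens then out ++ [item] else out) []

-- ===== PORT B =====
-- one filtering pass of B's outer token loop over the survivor list
def pvTokenPass (survivors : List (String × List (String × String))) (token : String) : List (String × List (String × String)) :=
  if PySem.Str.startswith token "-" then
    let crit := PySem.Str.slice token (some 1) none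
    survivors.filter (fun p => !PySem.Str.isIn crit p.1)
  else
    survivors.filter (fun p => PySem.Str.isIn token p.1)

def filter_items_by_query_py_alt (items : List (List (String × String))) (query_tokens : List String) : List (List (String × String)) :=
  if query_tokens = [] then items
  else
    let survivors := items.map (fun item => (((PySem.Dict.mk item).get? "name").getD "", item))
    (query_tokens.foldl pvTokenPass survivors).map Prod.snd

-- ===== PRECONDITION & SPEC =====
def Spec_filter_items_by_query_py (items : List (List (String × String))) (query_tokens : List String) (out : List (List (String × String))) : Prop := out = filter_items_by_query_py_alt items query_tokens
instance (items : List (List (String × String))) (query_tokens : List String) (out : List (List (String × String))) : Decidable (Spec_filter_items_by_query_py items query_tokens out) := by unfold Spec_filter_items_by_query_py; infer_instance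

-- ===== CLAIM (what is proved, stated in full; the proofs are below) =====
def Claim_equal_filter_items_by_query_py : Prop := ∀ (items : List (List (String × String))) (query_tokens : List String), Dom_filter_items_by_query_py items query_tokens → Spec_filter_items_by_query_py items query_tokens (filter_items_by_query_py items query_tokens)

-- ===== LEMMAS AND PROOFS =====
-- the per-token test both sides decide for a given name
def pvTokPred (name token : String) : Bool :=
  if PySem.Str.startswith token "-" then !PySem.Str.isIn (PySem.Str.slice token (some 1) none) name
  else PySem.Str.isIn token name

theorem pvTokenPass_filter (s : List (String × List (String × String))) (t : String) :
    pvTokenPass s t = s.filter (fun p => pvTokPred p.1 t) := by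
  unfold pvTokenPass pvTokPred
  by_cases h : PySem.Chars.startswith t.toList ['-'] = true <;> simp [h]

theorem pvFoldl_pass (ts : List String) (s : List (String × List (String × String))) :
    ts.foldl pvTokenPass s = s.filter (fun p => ts.all (pvTokPred p.1)) := by
  induction ts generalizing s with
  | nil => simp
  | cons t ts ih =>
    simp only [List.foldl_cons, pvTokenPass_filter, ih, List.filter_filter, List.all_cons]
    apply List.filter_congr
    intro p _
    exact (Bool.and_comm _ _)

theorem pvOkA_all (name : String) (ts : List String) :
    pvOkA name ts = ts.all (pvTokPred name) := by
  induction ts with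
  | nil => simp [pvOkA]
  | cons t ts ih =>
    have hstep : pvOkA name (t :: ts) = if pvTokPred name t then pvOkA name ts else false := by
      conv_lhs => rw [pvOkA]
      unfold pvTokPred
      by_cases hneg : PySem.Chars.startswith t.toList ['-'] = true <;>
        by_cases hc : PySem.Chars.isIn (PySem.List.slice t.toList (some 1)) name.toList = true <;>
          by_cases hc2 : PySem.Chars.isIn t.toList name.toList = true <;> simp_all
    rw [hstep, List.all_cons, ih]
    by_cases h : pvTokPred name t = true <;> simp [h]

-- ===== VERDICT (by name: the statement is the Claim_ definition above) =====
theorem filter_items_by_query_py_spec : Claim_equal_filter_items_by_query_py := by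
  intro items query_tokens _
  unfold Spec_filter_items_by_query_py filter_items_by_query_py filter_items_by_query_py_alt
  by_cases hq : query_tokens = []
  · simp [hq]
  · simp only [hq, pvFoldl_pass]
    rw [PySem.List.foldl_append_if_eq_filter]
    simp only [List.nil_append, List.filter_map, List.map_map, Function.comp_def, List.map_id']
    apply List.filter_congr
    intro item _
    rw [pvOkA_all]
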